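-- pv_equiv track=rewrite | github.com/r-hg/AnagramSolver | anagram-solver.py | return_anagrams
-- ===== SOURCE A (Python) =====
-- from collections import Counter
--
-- def return_anagrams(word_list, letters: str) -> list:
--     letters = letters.lower()
--     length_of_letters = len(letters)
--     num_of_each_letter = Counter(letters)
--     anagrams = set()
--
--     for word in word_list:
--
--         if not set(word) - set(letters):
--             check_word = set()
--
--             for letter, instances in Counter(word).items():
--                 if instances == num_of_each_letter[letter] and len(word) == length_of_letters:
--                     check_word.add(letter)
--
--             if check_word == set(word):
--                 anagrams.add(word)
--     anagrams.discard("")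
--
--     return sorted(list(anagrams), key=lambda x: len(x))
-- ===== SOURCE B (Python) =====
-- def return_anagrams(word_list, letters: str) -> list:
--     key = sorted(letters.lower())
--     found = set()
--     for word in word_list:
--         if word and sorted(word) == key:
--             found.add(word)
--     return sorted(found, key=len)
-- ===== Notes on version B (the rewrite author's own statement) =====
-- stated objective: faster
-- what changed: A's per-word set-difference/Counter count-matching accumulation is replaced by one canonical sorted key of letters.lower() compared with sorted(word), so the per-word set(letters) rebuild and the inner Counter/check_word loop disappear.
import Mathlib
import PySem

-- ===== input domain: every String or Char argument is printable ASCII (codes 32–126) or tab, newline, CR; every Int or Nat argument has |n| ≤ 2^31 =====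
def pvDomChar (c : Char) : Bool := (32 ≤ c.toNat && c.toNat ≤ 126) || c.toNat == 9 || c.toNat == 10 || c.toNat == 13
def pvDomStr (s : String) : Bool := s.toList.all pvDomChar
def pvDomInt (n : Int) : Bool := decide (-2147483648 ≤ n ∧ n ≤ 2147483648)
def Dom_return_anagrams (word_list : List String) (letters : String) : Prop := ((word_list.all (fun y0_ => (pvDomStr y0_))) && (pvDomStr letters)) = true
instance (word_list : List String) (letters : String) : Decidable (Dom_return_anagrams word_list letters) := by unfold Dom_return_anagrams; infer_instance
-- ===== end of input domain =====

-- B replaces A's per-word set-difference + Counter count-matching accumulation by one sorted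
-- canonical key of letters.lower() compared with sorted(word); letters is processed once instead
-- of per word (measured faster in a timing run). No argument is mutated.

-- ===== PORT A =====
def return_anagrams (word_list : List String) (letters : String) : List String :=
  let lettersL : List Char := PySem.Chars.lower letters.toList
  let length_of_letters : Nat := lettersL.length
  let num_of_each_letter : PySem.Dict Char Int := PySem.Dict.counter lettersL
  let anagrams : PySem.Set String :=
    word_list.foldl (fun anagrams word =>
      if ((PySem.Set.ofList word.toList).diff (PySem.Set.ofList lettersL)).isEmpty then
        let check_word : PySem.Set Char :=
          (PySem.Dict.counter word.toList).items.foldl (fun check_word li =>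
            if li.2 == num_of_each_letter.getD li.1 0 && word.toList.length == length_of_letters then
              check_word.add li.1
            else check_word) PySem.Set.empty
        if PySem.Set.equal check_word (PySem.Set.ofList word.toList) then anagrams.add word
        else anagrams
      else anagrams) PySem.Set.empty
  let anagrams := anagrams.discard ""
  PySem.List.sorted anagrams (fun x => x.toList.length) false

-- ===== PORT B =====
def return_anagrams_alt (word_list : List String) (letters : String) : List String :=
  let key : List Char := PySem.List.sorted (PySem.Chars.lower letters.toList) (fun c => c) false
  let found : PySem.Set String :=
    word_list.foldl (fun found word =>
      if !(word.toList == []) && (PySem.List.sorted word.toList (fun c => c) false == key) then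
        found.add word
      else found) PySem.Set.empty
  PySem.List.sorted found (fun x => x.toList.length) false

-- ===== PRECONDITION & SPEC =====
def Spec_return_anagrams (word_list : List String) (letters : String) (out : List String) : Prop := out = return_anagrams_alt word_list letters
instance (word_list : List String) (letters : String) (out : List String) : Decidable (Spec_return_anagrams word_list letters out) := by unfold Spec_return_anagrams; infer_instance

-- ===== CLAIM (what is proved, stated in full; the proofs are below) =====
def Claim_equal_return_anagrams : Prop := ∀ (word_list : List String) (letters : String), Dom_return_anagrams word_list letters → Spec_return_anagrams word_list letters (return_anagrams word_list letters)

-- ===== LEMMAS AND PROOFS =====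

-- A's per-word acceptance condition, as one Bool (the nested ifs of A's loop body).
def pvCondA (L : List Char) (w : String) : Bool :=
  if ((PySem.Set.ofList w.toList).diff (PySem.Set.ofList L)).isEmpty then
    PySem.Set.equal
      ((PySem.Dict.counter w.toList).items.foldl (fun cw li =>
        if li.2 == (PySem.Dict.counter L).getD li.1 0 && w.toList.length == L.length then
          cw.add li.1
        else cw) PySem.Set.empty)
      (PySem.Set.ofList w.toList)
  else false

-- B's per-word acceptance condition.
def pvCondB (L : List Char) (w : String) : Bool :=
  !(w.toList == []) && (PySem.List.sorted w.toList (fun c => c) false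
    == PySem.List.sorted L (fun c => c) false)

theorem pvMem_filter_fold {α : Type} [BEq α] [LawfulBEq α] (r : α → Bool)
    (l : List α) (acc : PySem.Set α) (x : α) :
    x ∈ l.foldl (fun s k => if r k then s.add k else s) acc ↔ x ∈ acc ∨ (x ∈ l ∧ r x = true) := by
  induction l generalizing acc with
  | nil => simp
  | cons a t ih =>
    simp only [List.foldl_cons, ih, List.mem_cons]
    by_cases h : r a = true
    · simp [h, PySem.Set.mem_add]
      constructor
      · rintro (⟨hm | rfl⟩ | h2)
        · exact Or.inl hm
        · exact Or.inr ⟨Or.inl rfl, h⟩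
        · exact Or.inr ⟨Or.inr h2.1, h2.2⟩
      · rintro (hm | ⟨rfl | hm, hr⟩)
        · exact Or.inl (Or.inl hm)
        · exact Or.inl (Or.inr rfl)
        · exact Or.inr ⟨hm, hr⟩
    · simp only [h, if_false, Bool.false_eq_true]
      constructor
      · rintro (hm | h2)
        · exact Or.inl hm
        · exact Or.inr ⟨Or.inr h2.1, h2.2⟩
      · rintro (hm | ⟨rfl | hm, hr⟩)
        · exact Or.inl hm
        · exact absurd hr h
        · exact Or.inr ⟨hm, hr⟩

theorem pvSubset_of_isEmpty_diff (cs L : List Char) :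
    ((PySem.Set.ofList cs).diff (PySem.Set.ofList L)).isEmpty = true ↔ ∀ c ∈ cs, c ∈ L := by
  rw [List.isEmpty_iff, List.eq_nil_iff_forall_not_mem]
  constructor
  · intro h c hc
    by_contra hcl
    exact h c ((PySem.Set.mem_diff _ _ _).2
      ⟨(PySem.Set.mem_ofList _ _).2 hc, fun hx => hcl ((PySem.Set.mem_ofList _ _).1 hx)⟩)
  · intro h c hc
    obtain ⟨hc1, hc2⟩ := (PySem.Set.mem_diff _ _ _).1 hc
    exact hc2 ((PySem.Set.mem_ofList _ _).2 (h c ((PySem.Set.mem_ofList _ _).1 hc1)))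

theorem pvPerm_of_counts (cs L : List Char)
    (hne : cs ≠ [])
    (hcnt : ∀ x ∈ cs, List.count x cs = List.count x L ∧ cs.length = L.length) :
    cs.Perm L := by
  obtain ⟨c0, hc0⟩ := List.exists_mem_of_ne_nil cs hne
  have hlen : cs.length = L.length := (hcnt c0 hc0).2
  have hle : (cs : Multiset Char) ≤ (L : Multiset Char) := by
    rw [Multiset.le_iff_count]
    intro a
    rw [Multiset.coe_count, Multiset.coe_count]
    by_cases ha : a ∈ cs
    · exact le_of_eq (hcnt a ha).1
    · simp [List.count_eq_zero_of_not_mem ha]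
  have hcard : ((L : Multiset Char)).card ≤ ((cs : Multiset Char)).card := by
    simp [hlen]
  exact Multiset.coe_eq_coe.1 (Multiset.eq_of_le_of_card_le hle hcard)

theorem pvCondA_iff (L : List Char) (w : String) :
    pvCondA L w = true ↔ (w.toList = [] ∨ w.toList.Perm L) := by
  unfold pvCondA
  by_cases h1 : ((PySem.Set.ofList w.toList).diff (PySem.Set.ofList L)).isEmpty = true
  · rw [if_pos h1]
    rw [pvSubset_of_isEmpty_diff] at h1
    -- rewrite the Counter items fold into a fold over the distinct letters of the word
    rw [PySem.Dict.items_counter, List.foldl_map]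
    simp only [PySem.Dict.getD_counter]
    -- characterise Set.equal via membership on both sides
    unfold PySem.Set.equal
    rw [Bool.and_eq_true, PySem.Set.issubset_iff, PySem.Set.issubset_iff]
    constructor
    · rintro ⟨_, hall⟩
      by_cases hnil : w.toList = []
      · exact Or.inl hnil
      · refine Or.inr (pvPerm_of_counts _ _ hnil ?_)
        intro x hx
        have hx' := hall x ((PySem.Set.mem_ofList _ _).2 hx)
        rw [pvMem_filter_fold] at hx'
        rcases hx' with hx' | ⟨-, hr⟩
        · simp [PySem.Set.empty] at hx'
        · rw [Bool.and_eq_true, beq_iff_eq, beq_iff_eq, Int.natCast_inj] at hr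
          exact hr
    · intro h
      rcases h with hnil | hperm
      · constructor
        · intro x hx
          rw [pvMem_filter_fold] at hx
          rcases hx with hx | ⟨hx, -⟩
          · simp [PySem.Set.empty] at hx
          · exact (PySem.Set.mem_ofList _ _).2 ((PySem.Set.mem_ofList _ _).1 hx)
        · intro x hx
          rw [(PySem.Set.mem_ofList _ _), hnil] at hx
          simp at hx
      · constructor
        · intro x hx
          rw [pvMem_filter_fold] at hx
          rcases hx with hx | ⟨hx, -⟩
          · simp [PySem.Set.empty] at hx
          · exact hx
        · intro x hx
          rw [pvMem_filter_fold]
          refine Or.inr ⟨hx, ?_⟩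
          rw [Bool.and_eq_true, beq_iff_eq, beq_iff_eq, Int.natCast_inj]
          exact ⟨hperm.count_eq x, hperm.length_eq⟩
  · rw [if_neg h1]
    simp only [Bool.false_eq_true, false_iff]
    rw [pvSubset_of_isEmpty_diff] at h1
    rintro (hnil | hperm)
    · exact h1 (by simp [hnil])
    · exact h1 (fun c hc => hperm.mem_iff.1 hc)

theorem pvCondB_iff (L : List Char) (w : String) :
    pvCondB L w = true ↔ (w.toList ≠ [] ∧ w.toList.Perm L) := by
  unfold pvCondB
  rw [Bool.and_eq_true, beq_iff_eq, Bool.not_eq_true', beq_eq_false_iff_ne]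
  constructor
  · rintro ⟨h1, h2⟩
    exact ⟨h1, (PySem.List.sorted_id_eq_sorted_id_iff_perm _ _).1 h2⟩
  · rintro ⟨h1, h2⟩
    exact ⟨h1, (PySem.List.sorted_id_eq_sorted_id_iff_perm _ _).2 h2⟩

-- discard "" commutes with the guarded-add fold, turning A's condition into B's.
theorem pvDiscard_add_self (s : PySem.Set String) (x : String) :
    (s.add x).discard x = s.discard x := by
  unfold PySem.Set.add PySem.Set.discard
  by_cases hc : s.contains x = true
  · rw [if_pos hc]
  · rw [if_neg hc, List.filter_append]
    simp

theorem pvDiscard_add_ne (s : PySem.Set String) (x y : String) (h : x ≠ y) :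
    (s.add x).discard y = (s.discard y).add x := by
  by_cases hm : x ∈ s
  · have h1 : s.add x = s := by
      unfold PySem.Set.add
      rw [if_pos]
      simpa using hm
    have h2 : (s.discard y).add x = s.discard y := by
      unfold PySem.Set.add
      rw [if_pos]
      have : x ∈ s.discard y := (PySem.Set.mem_discard s y x).2 ⟨hm, h⟩
      simpa using this
    rw [h1, h2]
  · have h1 : s.add x = s ++ [x] := by
      unfold PySem.Set.add
      rw [if_neg]
      simpa using hm
    have h2 : (s.discard y).add x = s.discard y ++ [x] := by
      unfold PySem.Set.add
      rw [if_neg]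
      have : x ∉ s.discard y := fun hx => hm ((PySem.Set.mem_discard s y x).1 hx).1
      simpa using this
    rw [h1, h2]
    unfold PySem.Set.discard
    rw [List.filter_append]
    simp [h]

theorem pvFold_discard (p q : String → Bool)
    (hpq : ∀ w, w ≠ "" → p w = q w) (hq : ∀ w, w = "" → q w = false)
    (l : List String) (acc : PySem.Set String) :
    (l.foldl (fun s w => if p w then s.add w else s) acc).discard "" =
      l.foldl (fun s w => if q w then s.add w else s) (acc.discard "") := by
  induction l generalizing acc with
  | nil => rfl
  | cons a t ih =>
    simp only [List.foldl_cons]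
    rw [ih]
    congr 1
    by_cases ha : a = ""
    · subst ha
      by_cases hp : p "" = true
      · rw [if_pos hp, hq "" rfl]
        simp only [Bool.false_eq_true, if_false]
        exact pvDiscard_add_self acc ""
      · rw [if_neg hp, hq "" rfl]
        simp only [Bool.false_eq_true, if_false]
    · rw [hpq a ha]
      by_cases hqa : q a = true
      · rw [if_pos hqa, if_pos hqa, pvDiscard_add_ne _ _ _ ha]
      · rw [if_neg hqa, if_neg hqa]

theorem return_anagrams_eq (word_list : List String) (letters : String) :
    return_anagrams word_list letters = return_anagrams_alt word_list letters := by
  simp only [return_anagrams, return_anagrams_alt]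
  have hA : (fun (anagrams : PySem.Set String) (word : String) =>
      if ((PySem.Set.ofList word.toList).diff (PySem.Set.ofList (PySem.Chars.lower letters.toList))).isEmpty then
        let check_word : PySem.Set Char :=
          (PySem.Dict.counter word.toList).items.foldl (fun check_word li =>
            if li.2 == (PySem.Dict.counter (PySem.Chars.lower letters.toList)).getD li.1 0
                && word.toList.length == (PySem.Chars.lower letters.toList).length then
              check_word.add li.1
            else check_word) PySem.Set.empty
        if PySem.Set.equal check_word (PySem.Set.ofList word.toList) then anagrams.add word
        else anagrams
      else anagrams) =
      (fun (s : PySem.Set String) (w : String) =>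
        if pvCondA (PySem.Chars.lower letters.toList) w then s.add w else s) := by
    funext s w
    unfold pvCondA
    by_cases h1 : ((PySem.Set.ofList w.toList).diff (PySem.Set.ofList (PySem.Chars.lower letters.toList))).isEmpty = true
    · simp only [h1, if_true]
    · simp [h1]
  have hB : (fun (found : PySem.Set String) (word : String) =>
      if !(word.toList == []) && (PySem.List.sorted word.toList (fun c => c) false
          == PySem.List.sorted (PySem.Chars.lower letters.toList) (fun c => c) false) then
        found.add word
      else found) =
      (fun (s : PySem.Set String) (w : String) =>
        if pvCondB (PySem.Chars.lower letters.toList) w then s.add w else s) := by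
    funext s w
    rfl
  rw [hA, hB]
  congr 1
  rw [pvFold_discard (pvCondA (PySem.Chars.lower letters.toList)) (pvCondB (PySem.Chars.lower letters.toList))]
  · rfl
  · intro w hw
    have hwl : w.toList ≠ [] := fun h => hw (String.toList_eq_nil_iff.mp h)
    rw [Bool.eq_iff_iff, pvCondA_iff, pvCondB_iff]
    simp [hwl]
  · intro w hw
    subst hw
    unfold pvCondB
    simp

-- ===== VERDICT (by name: the statement is the Claim_ definition above) =====
theorem return_anagrams_spec : Claim_equal_return_anagrams := by
  intro word_list letters _
  exact return_anagrams_eq word_list letters
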